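-- pv_equiv track=rewrite | github.com/t0r1n88/Lachesis | mental_state/dopok_leon_osin.py | calc_value_zo
-- ===== SOURCE A (Python) =====
-- def calc_value_zo(row):
--     """
--     Функция для подсчета значения
--     :return: число
--     """
--     lst_pr = [2,8,11,13,18,20,23]
--     lst_neg = [13]
--     value_forward = 0  # результат
--     for idx, value in enumerate(row,1):
--         if idx in lst_pr:
--             if idx not in lst_neg:
--                 value_forward += value
--             else:
--                 if value == 1:
--                     value_forward += 4
--                 elif value == 2:
--                     value_forward += 3
--                 elif value == 3:
--                     value_forward += 2
--                 else:
--                     value_forward += 1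
--
--
--     return value_forward
-- ===== SOURCE B (Python) =====
-- def calc_value_zo(row):
--     n = len(row)
--     total = sum(row[i] for i in (1, 7, 10, 17, 19, 22) if i < n)
--     if 12 < n:
--         total += {1: 4, 2: 3, 3: 2}.get(row[12], 1)
--     return total
-- ===== Notes on version B (the rewrite author's own statement) =====
-- stated objective: faster
-- what changed: B replaces A's enumerate-and-scan over the whole row (testing every 1-based index against the selected-index list) with direct length-guarded reads of the six additive positions and a dict lookup for the special thirteenth entry, so the row is no longer traversed.
import Mathlib
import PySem

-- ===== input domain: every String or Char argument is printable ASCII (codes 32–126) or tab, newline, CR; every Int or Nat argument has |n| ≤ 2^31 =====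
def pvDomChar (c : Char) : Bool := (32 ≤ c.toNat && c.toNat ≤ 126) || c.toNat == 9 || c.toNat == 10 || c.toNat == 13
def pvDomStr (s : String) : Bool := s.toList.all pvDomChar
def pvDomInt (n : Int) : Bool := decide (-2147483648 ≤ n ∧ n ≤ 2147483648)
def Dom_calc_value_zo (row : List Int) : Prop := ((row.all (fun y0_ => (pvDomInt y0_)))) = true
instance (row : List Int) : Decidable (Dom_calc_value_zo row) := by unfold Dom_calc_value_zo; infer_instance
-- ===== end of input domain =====

-- B replaces A's scan of the whole row with direct length-guarded reads of the six
-- additive positions and a dict lookup for the special thirteenth entry (objective: faster).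

-- ===== PORT A =====
-- loop body of A, kept as a helper (branches in A's order)
def calcStep (value_forward : Int) (p : Int × Int) : Int :=
  if p.1 ∈ ([2, 8, 11, 13, 18, 20, 23] : List Int) then
    if p.1 ∉ ([13] : List Int) then value_forward + p.2
    else if p.2 = 1 then value_forward + 4
    else if p.2 = 2 then value_forward + 3
    else if p.2 = 3 then value_forward + 2
    else value_forward + 1
  else value_forward

def calc_value_zo (row : List Int) : Int :=
  (PySem.List.enumerate row 1).foldl calcStep 0

-- ===== PORT B =====
def calc_value_zo_alt (row : List Int) : Int :=
  let n : Int := row.length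
  let total : Int := ([1, 7, 10, 17, 19, 22] : List Int).foldl
    (fun acc i => if i < n then acc + PySem.List.pyGetD row i 0 else acc) 0
  if (12 : Int) < n then
    total + ((((PySem.Dict.empty : PySem.Dict Int Int).insert 1 4).insert 2 3).insert 3 2).getD
      (PySem.List.pyGetD row 12 0) 1
  else total

-- ===== PRECONDITION & SPEC =====
def Spec_calc_value_zo (row : List Int) (out : Int) : Prop := out = calc_value_zo_alt row
instance (row : List Int) (out : Int) : Decidable (Spec_calc_value_zo row out) := by unfold Spec_calc_value_zo; infer_instance

-- ===== CLAIM (what is proved, stated in full; the proofs are below) =====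
def Claim_equal_calc_value_zo : Prop := ∀ (row : List Int), Dom_calc_value_zo row → Spec_calc_value_zo row (calc_value_zo row)

-- ===== LEMMAS AND PROOFS =====
theorem calcStep_2 (a x : Int) : calcStep a (2, x) = a + x := by norm_num [calcStep]
theorem calcStep_8 (a x : Int) : calcStep a (8, x) = a + x := by norm_num [calcStep]
theorem calcStep_11 (a x : Int) : calcStep a (11, x) = a + x := by norm_num [calcStep]
theorem calcStep_18 (a x : Int) : calcStep a (18, x) = a + x := by norm_num [calcStep]
theorem calcStep_20 (a x : Int) : calcStep a (20, x) = a + x := by norm_num [calcStep]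
theorem calcStep_23 (a x : Int) : calcStep a (23, x) = a + x := by norm_num [calcStep]
theorem calcStep_1 (a x : Int) : calcStep a (1, x) = a := by norm_num [calcStep]
theorem calcStep_3 (a x : Int) : calcStep a (3, x) = a := by norm_num [calcStep]
theorem calcStep_4 (a x : Int) : calcStep a (4, x) = a := by norm_num [calcStep]
theorem calcStep_5 (a x : Int) : calcStep a (5, x) = a := by norm_num [calcStep]
theorem calcStep_6 (a x : Int) : calcStep a (6, x) = a := by norm_num [calcStep]
theorem calcStep_7 (a x : Int) : calcStep a (7, x) = a := by norm_num [calcStep]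
theorem calcStep_9 (a x : Int) : calcStep a (9, x) = a := by norm_num [calcStep]
theorem calcStep_10 (a x : Int) : calcStep a (10, x) = a := by norm_num [calcStep]
theorem calcStep_12 (a x : Int) : calcStep a (12, x) = a := by norm_num [calcStep]
theorem calcStep_14 (a x : Int) : calcStep a (14, x) = a := by norm_num [calcStep]
theorem calcStep_15 (a x : Int) : calcStep a (15, x) = a := by norm_num [calcStep]
theorem calcStep_16 (a x : Int) : calcStep a (16, x) = a := by norm_num [calcStep]
theorem calcStep_17 (a x : Int) : calcStep a (17, x) = a := by norm_num [calcStep]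
theorem calcStep_19 (a x : Int) : calcStep a (19, x) = a := by norm_num [calcStep]
theorem calcStep_21 (a x : Int) : calcStep a (21, x) = a := by norm_num [calcStep]
theorem calcStep_22 (a x : Int) : calcStep a (22, x) = a := by norm_num [calcStep]
theorem calcStep_13 (a x : Int) : calcStep a (13, x) = if x = 1 then a + 4 else if x = 2 then a + 3 else if x = 3 then a + 2 else a + 1 := by norm_num [calcStep]

-- beyond 1-based index 23, A's loop adds nothing
theorem calcStep_tail (xs : List Int) : ∀ (k a : Int), 24 ≤ k →
    (PySem.List.enumerate xs k).foldl calcStep a = a := by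
  induction xs with
  | nil => intro k a _; simp [PySem.List.enumerate_nil]
  | cons x xs ih =>
    intro k a hk
    rw [PySem.List.enumerate_cons, List.foldl_cons]
    have h1 : calcStep a (k, x) = a := by
      have : k ∉ ([2, 8, 11, 13, 18, 20, 23] : List Int) := by simp; omega
      simp [calcStep, this]
    rw [h1]
    exact ih (k + 1) a (by omega)

-- for rows with at least 23 entries every guard in B is true
theorem alt_large (row : List Int) (h : 23 ≤ row.length) :
    calc_value_zo_alt row =
      0 + PySem.List.pyGetD row 1 0 + PySem.List.pyGetD row 7 0 + PySem.List.pyGetD row 10 0 +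
        PySem.List.pyGetD row 17 0 + PySem.List.pyGetD row 19 0 + PySem.List.pyGetD row 22 0 +
        ((((PySem.Dict.empty : PySem.Dict Int Int).insert 1 4).insert 2 3).insert 3 2).getD
          (PySem.List.pyGetD row 12 0) 1 := by
  have h1 : (1 : Int) < (row.length : Int) := by omega
  have h7 : (7 : Int) < (row.length : Int) := by omega
  have h10 : (10 : Int) < (row.length : Int) := by omega
  have h12 : (12 : Int) < (row.length : Int) := by omega
  have h17 : (17 : Int) < (row.length : Int) := by omega
  have h19 : (19 : Int) < (row.length : Int) := by omega
  have h22 : (22 : Int) < (row.length : Int) := by omega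
  simp only [calc_value_zo_alt, List.foldl_cons, List.foldl_nil,
    if_pos h1, if_pos h7, if_pos h10, if_pos h12, if_pos h17, if_pos h19, if_pos h22]

-- ===== VERDICT (by name: the statement is the Claim_ definition above) =====
set_option maxHeartbeats 4000000 in
theorem calc_value_zo_spec : Claim_equal_calc_value_zo := by
  unfold Claim_equal_calc_value_zo
  intro row _
  unfold Spec_calc_value_zo
  rcases row with _|⟨a1, _|⟨a2, _|⟨a3, _|⟨a4, _|⟨a5, _|⟨a6, _|⟨a7, _|⟨a8, _|⟨a9, _|⟨a10, _|⟨a11, _|⟨a12, _|⟨a13, _|⟨a14, _|⟨a15, _|⟨a16, _|⟨a17, _|⟨a18, _|⟨a19, _|⟨a20, _|⟨a21, _|⟨a22, _|⟨a23, rest⟩⟩⟩⟩⟩⟩⟩⟩⟩⟩⟩⟩⟩⟩⟩⟩⟩⟩⟩⟩⟩⟩⟩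
  all_goals
    simp only [calc_value_zo, PySem.List.enumerate_cons, PySem.List.enumerate_nil,
      List.foldl_cons, List.foldl_nil, Int.reduceAdd,
      calcStep_2, calcStep_8, calcStep_11, calcStep_18, calcStep_20, calcStep_23,
      calcStep_1, calcStep_3, calcStep_4, calcStep_5, calcStep_6, calcStep_7,
      calcStep_9, calcStep_10, calcStep_12, calcStep_14, calcStep_15, calcStep_16,
      calcStep_17, calcStep_19, calcStep_21, calcStep_22, calcStep_13]
  -- the 23 short rows: every guard in B is a closed numeric comparison
  all_goals try (
    simp only [calc_value_zo_alt, List.foldl_cons, List.foldl_nil, List.length_cons,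
      List.length_nil, Nat.reduceAdd, Nat.cast_ofNat, Nat.cast_one, Nat.cast_zero,
      Int.reduceLT, reduceIte];
    all_goals simp [PySem.List.pyGetD_ofNat', PySem.Dict.getD_insert, PySem.Dict.getD_empty];
    all_goals (split_ifs <;> omega))
  -- the remaining goal: rows with 23 or more entries
  all_goals
    rw [calcStep_tail _ 24 _ (by norm_num),
      alt_large _ (by simp only [List.length_cons]; omega)]
  all_goals
    simp [PySem.List.pyGetD_ofNat', PySem.Dict.getD_insert, PySem.Dict.getD_empty]
  all_goals split_ifs <;> omega
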